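-- pv_equiv track=rewrite | github.com/vamsikrishna07/Amazon-OA | countPossibleWinners.py | countPossibleWinners
-- ===== SOURCE A (Python) =====
-- def countPossibleWinners(initialRewards):
--     max_val, n = max(initialRewards), len(initialRewards)
--     res, num_of_max = 0, 0
--     for num in initialRewards:
--         if num == max_val:
--             num_of_max += 1
--         else:
--             if num + n  >= max_val + n-1:
--                 res += 1
--     return res + num_of_max
-- ===== SOURCE B (Python) =====
-- def countPossibleWinners(initialRewards):
--     s = sorted(initialRewards)
--     t = s[-1] - 1
--     lo, hi = 0, len(s)
--     while lo < hi:
--         mid = (lo + hi) // 2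
--         if s[mid] < t:
--             lo = mid + 1
--         else:
--             hi = mid
--     return len(s) - lo
-- ===== Notes on version B (the rewrite author's own statement) =====
-- stated objective: alternative
-- what changed: Replaces A's conditional counting scan by sorting the list and binary-searching (lower bound) for max-1, returning the length of the suffix of elements >= max-1.
import Mathlib
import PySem

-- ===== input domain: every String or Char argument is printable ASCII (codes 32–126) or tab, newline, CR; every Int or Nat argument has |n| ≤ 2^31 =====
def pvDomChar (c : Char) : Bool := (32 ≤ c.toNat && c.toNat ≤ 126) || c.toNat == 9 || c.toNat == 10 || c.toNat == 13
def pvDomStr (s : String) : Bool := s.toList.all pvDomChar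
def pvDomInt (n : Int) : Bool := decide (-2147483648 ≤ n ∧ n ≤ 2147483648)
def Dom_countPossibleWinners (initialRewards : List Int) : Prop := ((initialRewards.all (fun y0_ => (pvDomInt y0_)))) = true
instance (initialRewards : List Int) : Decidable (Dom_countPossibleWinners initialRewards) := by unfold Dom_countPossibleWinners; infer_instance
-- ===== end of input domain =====

-- B sorts the list and binary-searches the lower bound of max-1, returning the
-- suffix length, instead of A's conditional counting scan (alternative; not faster).


-- ===== PORT A =====
def countPossibleWinners (initialRewards : List Int) : Int :=
  match PySem.List.max? initialRewards (fun x => x) with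
  | none => 0   -- unreachable: Pre_ excludes [], where Python's max raises ValueError
  | some max_val =>
    let n : Int := initialRewards.length
    let st := initialRewards.foldl (fun (p : Int × Int) num =>
        if num = max_val then (p.1, p.2 + 1)
        else if num + n ≥ max_val + n - 1 then (p.1 + 1, p.2)
        else p) (0, 0)
    st.1 + st.2

-- ===== PORT B =====
-- the while lo < hi binary-search loop of Source B, recursion on hi - lo
def pvBS (s : List Int) (t lo hi : Int) : Int :=
  if h : lo < hi then
    let mid := PySem.Int.floordiv (lo + hi) 2
    match PySem.List.pyGet? s mid with
    | none => lo   -- unreachable: the loop keeps 0 ≤ lo ≤ mid < hi ≤ len, so s[mid] never raises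
    | some v =>
      if v < t then pvBS s t (mid + 1) hi else pvBS s t lo mid
  else lo
termination_by (hi - lo).toNat
decreasing_by
  · have := (PySem.Int.floordiv_two_mid_bounds (le_of_lt h)).1
    have := (PySem.Int.floordiv_two_mid_bounds (le_of_lt h)).2
    omega
  · have := (PySem.Int.floordiv_two_mid_bounds (le_of_lt h)).1
    have hm : PySem.Int.floordiv (lo + hi) 2 < hi := by
      rw [PySem.Int.floordiv_lt_iff_lt_mul (by omega)]; omega
    omega

def countPossibleWinners_alt (initialRewards : List Int) : Int :=
  let s := PySem.List.sorted initialRewards (fun x => x) false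
  match PySem.List.pyGet? s (-1) with
  | none => 0   -- unreachable: Pre_ excludes [], where s[-1] raises IndexError
  | some last =>
    let t := last - 1
    let lo := pvBS s t 0 s.length
    (s.length : Int) - lo

-- ===== PRECONDITION & SPEC =====
-- The empty list is excluded: there Python's A raises ValueError (max([])) and B raises IndexError (s[-1]).
def Pre_countPossibleWinners (initialRewards : List Int) : Prop := initialRewards ≠ []
instance (initialRewards : List Int) : Decidable (Pre_countPossibleWinners initialRewards) := by unfold Pre_countPossibleWinners; infer_instance
def pvWitness_countPossibleWinners : List Int := [3, 2, 3, 1]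

def Spec_countPossibleWinners (initialRewards : List Int) (out : Int) : Prop := out = countPossibleWinners_alt initialRewards
instance (initialRewards : List Int) (out : Int) : Decidable (Spec_countPossibleWinners initialRewards out) := by unfold Spec_countPossibleWinners; infer_instance

-- ===== CLAIM (what is proved, stated in full; the proofs are below) =====
def Claim_equal_countPossibleWinners : Prop := ∀ (initialRewards : List Int), Dom_countPossibleWinners initialRewards → Pre_countPossibleWinners initialRewards → Spec_countPossibleWinners initialRewards (countPossibleWinners initialRewards)

-- ===== LEMMAS AND PROOFS =====

-- A's fold: the two counters sum to the number of elements ≥ m - 1 (both branches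
-- that increment are exactly num = m or num ≥ m - 1 ∧ num ≠ m).
theorem pvA_fold_sum (m n : Int) (l : List Int) (a b : Int) :
    (l.foldl (fun (p : Int × Int) num =>
        if num = m then (p.1, p.2 + 1)
        else if num + n ≥ m + n - 1 then (p.1 + 1, p.2)
        else p) (a, b)).1 +
    (l.foldl (fun (p : Int × Int) num =>
        if num = m then (p.1, p.2 + 1)
        else if num + n ≥ m + n - 1 then (p.1 + 1, p.2)
        else p) (a, b)).2
    = a + b + (l.countP (fun x => decide (m - 1 ≤ x)) : Int) := by
  induction l generalizing a b with
  | nil => simp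
  | cons x t ih =>
    rw [List.foldl_cons, List.countP_cons]
    by_cases hx : x = m
    · have hc : decide (m - 1 ≤ x) = true := decide_eq_true (by omega)
      rw [if_pos hx, ih, hc]; simp; omega
    · rw [if_neg hx]
      by_cases hge : x + n ≥ m + n - 1
      · have hc : decide (m - 1 ≤ x) = true := decide_eq_true (by omega)
        rw [if_pos hge, ih, hc]; simp; omega
      · have hc : decide (m - 1 ≤ x) = false := decide_eq_false (by omega)
        rw [if_neg hge, ih, hc]; simp

-- if a predicate fails exactly on the indices below r, the countP is length - r
theorem pvCountP_suffix (s : List Int) (p : Int → Bool) (r : Nat) (hr : r ≤ s.length)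
    (h1 : ∀ i (h : i < s.length), i < r → ¬ p s[i])
    (h2 : ∀ i (h : i < s.length), r ≤ i → p s[i]) :
    s.countP p = s.length - r := by
  induction s generalizing r with
  | nil => simp_all
  | cons x tl ih =>
    cases r with
    | zero =>
      rw [List.countP_cons]
      have hx : p x := h2 0 (by simp) (by omega)
      have htl : tl.countP p = tl.length - 0 := ih 0 (by omega)
        (fun i h hi => by omega)
        (fun i h _ => h2 (i + 1) (by simpa using Nat.succ_lt_succ h) (by omega))
      simp [htl, hx]
    | succ k =>
      rw [List.countP_cons]
      have hx : ¬ p x := h1 0 (by simp) (by omega)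
      have htl : tl.countP p = tl.length - k := ih k (by simpa using hr)
        (fun i h hi => h1 (i + 1) (by simpa using Nat.succ_lt_succ h) (by omega))
        (fun i h hi => h2 (i + 1) (by simpa using Nat.succ_lt_succ h) (by omega))
      simp [htl, hx]

-- binary-search invariant: given sortedness via monotone indexing, pvBS returns the
-- first index whose element is not < t
theorem pvBS_spec (s : List Int) (t : Int)
    (hmono : ∀ p q (hp : p ≤ q) (hq : q < s.length), s[p] ≤ s[q])
    (lo hi : Int) (hlo : 0 ≤ lo) (hlh : lo ≤ hi) (hhi : hi ≤ s.length)
    (h1 : ∀ i (h : i < s.length), i < lo.toNat → s[i] < t)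
    (h2 : ∀ i (h : i < s.length), hi.toNat ≤ i → ¬ s[i] < t) :
    ∃ r : Nat, pvBS s t lo hi = (r : Int) ∧ r ≤ s.length ∧
      (∀ i (h : i < s.length), i < r → s[i] < t) ∧
      (∀ i (h : i < s.length), r ≤ i → ¬ s[i] < t) := by
  rw [pvBS]
  by_cases h : lo < hi
  · rw [dif_pos h]
    have hb1 := (PySem.Int.floordiv_two_mid_bounds (le_of_lt h)).1
    have hb2 : PySem.Int.floordiv (lo + hi) 2 < hi := by
      rw [PySem.Int.floordiv_lt_iff_lt_mul (by omega)]; omega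
    have hmlen : (PySem.Int.floordiv (lo + hi) 2).toNat < s.length := by omega
    have hget : PySem.List.pyGet? s (PySem.Int.floordiv (lo + hi) 2)
        = some (s[(PySem.Int.floordiv (lo + hi) 2).toNat]'hmlen) :=
      PySem.List.pyGet?_eq_some_getElem s (by omega) (by omega)
    simp only [hget]
    by_cases hv : s[(PySem.Int.floordiv (lo + hi) 2).toNat]'hmlen < t
    · rw [if_pos hv]
      exact pvBS_spec s t hmono (PySem.Int.floordiv (lo + hi) 2 + 1) hi (by omega) (by omega) hhi
        (fun i hl hi' =>
          lt_of_le_of_lt (hmono i (PySem.Int.floordiv (lo + hi) 2).toNat (by omega) hmlen) hv)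
        h2
    · rw [if_neg hv]
      exact pvBS_spec s t hmono lo (PySem.Int.floordiv (lo + hi) 2) hlo (by omega) (by omega)
        h1
        (fun i hl hi' hc =>
          hv (lt_of_le_of_lt (hmono (PySem.Int.floordiv (lo + hi) 2).toNat i (by omega) hl) hc))
  · rw [dif_neg h]
    have hle : lo = hi := le_antisymm hlh (by omega)
    refine ⟨lo.toNat, by omega, by omega, h1, ?_⟩
    intro i hl hi'
    exact h2 i hl (by omega)
termination_by (hi - lo).toNat
decreasing_by
  · omega
  · omega

-- ===== VERDICT (by name: the statement is the Claim_ definition above) =====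
theorem countPossibleWinners_spec : Claim_equal_countPossibleWinners := by
  intro l _ hpre
  unfold Spec_countPossibleWinners countPossibleWinners countPossibleWinners_alt
  obtain ⟨m, hm⟩ : ∃ m, PySem.List.max? l (fun x => x) = some m := by
    cases hmax : PySem.List.max? l (fun x => x) with
    | none => exact absurd ((PySem.List.max?_eq_none_iff l (fun x => x)).mp hmax) hpre
    | some m => exact ⟨m, rfl⟩
  have hle : ∀ x ∈ l, x ≤ m := PySem.List.max?_isMax hm
  have hmem : m ∈ l := PySem.List.max?_mem hm
  set s := PySem.List.sorted l (fun x => x) false with hs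
  have hperm : s.Perm l := PySem.List.sorted_perm l (fun x => x) false
  have hsne : s ≠ [] := by
    intro hnil
    exact hpre (List.Perm.eq_nil (hnil ▸ hperm.symm))
  have hmono : ∀ p q (hp : p ≤ q) (hq : q < s.length), s[p] ≤ s[q] := by
    intro p q hp hq
    exact PySem.List.sorted_id_getElem_mono l hp hq
  -- s[-1] is the last element, and it equals the max m
  have hlast : PySem.List.pyGet? s (-1) = some (s.getLast hsne) := by
    rw [PySem.List.pyGet?_neg_one, List.getLast?_eq_some_getLast hsne]
  have hlen0 : 0 < s.length := List.length_pos_iff.mpr hsne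
  have hlast_eq : s.getLast hsne = m := by
    have hgl : s.getLast hsne = s[s.length - 1]'(by omega) := List.getLast_eq_getElem hsne
    apply le_antisymm
    · exact hle _ (hperm.mem_iff.mp (List.getLast_mem hsne))
    · obtain ⟨j, hj, hjm⟩ := List.getElem_of_mem (hperm.mem_iff.mpr hmem)
      rw [hgl, ← hjm]
      exact hmono j (s.length - 1) (by omega) (by omega)
  simp only [hm, hlast, hlast_eq]
  -- run the binary search
  obtain ⟨r, hr, hrle, hr1, hr2⟩ := pvBS_spec s (m - 1) hmono 0 (s.length) (by omega)
    (by omega) (by omega) (by omega) (fun i h hi' => by omega)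
  rw [hr]
  have hcnt : s.countP (fun x => decide (m - 1 ≤ x)) = s.length - r :=
    pvCountP_suffix s _ r hrle
      (fun i h hi' => by have := hr1 i h hi'; simp; omega)
      (fun i h hi' => by have := hr2 i h hi'; simp; omega)
  have hl : l.countP (fun x => decide (m - 1 ≤ x)) = s.length - r := by
    rw [← hperm.countP_eq]; exact hcnt
  rw [pvA_fold_sum]
  omega
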